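-- pv_equiv track=rewrite | github.com/tomerkeizler/Fantaze | server/create_team/create_team.py | create_price_buckets_per_position_sort_by_performance
-- ===== SOURCE A (Python) =====
-- MAX_PRICE = 15
--
-- def create_price_buckets_per_position_sort_by_performance(players_map_per_position, price):
--     price_buckets_map_sort_by_performance = {}
--     for key in players_map_per_position.keys():
--         price_buckets_map_sort_by_performance[key] = []
--         for i in range(MAX_PRICE + 1):
--             price_buckets_map_sort_by_performance[key].append([])
--         for player in players_map_per_position[key].values():
--             price_buckets_map_sort_by_performance[key][player['price']].append(player)
--         for i in range(MAX_PRICE + 1):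
--             price_buckets_map_sort_by_performance[key][i] = sorted(price_buckets_map_sort_by_performance[key][i], key=lambda x: x['performance'], reverse=True)
--     return price_buckets_map_sort_by_performance
-- ===== SOURCE B (Python) =====
-- MAX_PRICE = 15
--
-- def create_price_buckets_per_position_sort_by_performance(players_map_per_position, price):
--     # Sort each position's players once by performance (stable, descending),
--     # then distribute them into the price buckets; appending in that order
--     # leaves every bucket already sorted, so no per-bucket sort is needed.
--     result = {}
--     for key in players_map_per_position.keys():
--         players_sorted = sorted(players_map_per_position[key].values(),
--                                 key=lambda x: x['performance'], reverse=True)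
--         buckets = [[] for _ in range(MAX_PRICE + 1)]
--         for player in players_sorted:
--             buckets[player['price']].append(player)
--         result[key] = buckets
--     return result
-- ===== Notes on version B (the rewrite author's own statement) =====
-- stated objective: simpler
-- what changed: Instead of scattering players into 16 price buckets and then sorting every bucket separately, B stable-sorts each position's players once by performance (descending) and then scatters them into the buckets, which therefore come out already sorted with identical tie order.
import Mathlib
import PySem

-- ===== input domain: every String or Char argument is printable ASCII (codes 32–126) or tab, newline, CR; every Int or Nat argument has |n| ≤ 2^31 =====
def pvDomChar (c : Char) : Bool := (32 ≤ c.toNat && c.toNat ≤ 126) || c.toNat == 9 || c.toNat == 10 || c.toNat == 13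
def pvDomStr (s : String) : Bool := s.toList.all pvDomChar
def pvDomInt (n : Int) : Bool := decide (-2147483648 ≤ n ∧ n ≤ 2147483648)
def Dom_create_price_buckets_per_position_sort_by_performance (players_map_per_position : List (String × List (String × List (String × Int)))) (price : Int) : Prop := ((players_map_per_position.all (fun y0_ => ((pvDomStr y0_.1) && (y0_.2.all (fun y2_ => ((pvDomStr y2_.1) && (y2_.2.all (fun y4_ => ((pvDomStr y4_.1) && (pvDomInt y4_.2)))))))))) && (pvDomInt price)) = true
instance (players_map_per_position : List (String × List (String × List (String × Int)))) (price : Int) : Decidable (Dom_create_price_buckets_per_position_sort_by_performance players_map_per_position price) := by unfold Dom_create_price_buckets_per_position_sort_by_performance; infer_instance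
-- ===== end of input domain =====

-- B sorts each position's players once by performance (stable, descending) and scatters them
-- into the 16 price buckets, instead of A's scatter-then-sort-every-bucket; simpler, same result.
-- pvPlayerGet pl k = pl[k] for a player dict (total form; Pre_ guarantees the key is present).
def pvPlayerGet (pl : List (String × Int)) (k : String) : Int :=
  (PySem.Dict.mk pl).getD k 0

-- ===== PORT A =====
-- transliteration note: A assigns out[key] = [] and mutates that slot in place; since the slot is
-- only touched while processing this key, the port inserts the finished bucket list once.
def create_price_buckets_per_position_sort_by_performance (players_map_per_position : List (String × List (String × List (String × Int)))) (price : Int) : List (String × List (List (List (String × Int)))) :=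
  (players_map_per_position.foldl
    (fun d kv =>
      let key := kv.1
      -- for i in range(MAX_PRICE + 1): append([])
      let b1 : List (List (List (String × Int))) :=
        (PySem.List.pyRange 0 (15 + 1)).foldl (fun b _ => b ++ [([] : List (List (String × Int)))]) []
      -- for player in players_map_per_position[key].values(): buckets[player['price']].append(player)
      let b2 :=
        ((PySem.Dict.mk ((PySem.Dict.mk players_map_per_position).getD key [])).values).foldl
          (fun b player =>
            PySem.List.pySetD b (pvPlayerGet player "price")
              (PySem.List.pyGetD b (pvPlayerGet player "price") [] ++ [player])) b1
      -- for i in range(MAX_PRICE + 1): buckets[i] = sorted(buckets[i], key=..., reverse=True)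
      let b3 :=
        (PySem.List.pyRange 0 (15 + 1)).foldl
          (fun b i =>
            PySem.List.pySetD b i
              (PySem.List.sorted (PySem.List.pyGetD b i [])
                (fun x => pvPlayerGet x "performance") true)) b2
      d.insert key b3)
    PySem.Dict.empty).items

-- ===== PORT B =====
def create_price_buckets_per_position_sort_by_performance_alt (players_map_per_position : List (String × List (String × List (String × Int)))) (price : Int) : List (String × List (List (List (String × Int)))) :=
  (players_map_per_position.foldl
    (fun d kv =>
      let key := kv.1
      -- players_sorted = sorted(players_map_per_position[key].values(), key=..., reverse=True)
      let players_sorted :=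
        PySem.List.sorted ((PySem.Dict.mk ((PySem.Dict.mk players_map_per_position).getD key [])).values)
          (fun x => pvPlayerGet x "performance") true
      -- buckets = [[] for _ in range(MAX_PRICE + 1)]
      let buckets0 : List (List (List (String × Int))) :=
        (List.range (15 + 1)).map (fun _ => [])
      -- for player in players_sorted: buckets[player['price']].append(player)
      let buckets :=
        players_sorted.foldl
          (fun b player =>
            PySem.List.pySetD b (pvPlayerGet player "price")
              (PySem.List.pyGetD b (pvPlayerGet player "price") [] ++ [player])) buckets0
      d.insert key buckets)
    PySem.Dict.empty).items

-- ===== PRECONDITION & SPEC =====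
-- Pre_ = exactly the inputs where Python A returns: every player dict has a 'price' whose value is a
-- valid index into the 16 buckets (Python negative-index rule, so -16 ≤ price < 16; otherwise
-- IndexError) and has a 'performance' key (otherwise KeyError).
def Pre_create_price_buckets_per_position_sort_by_performance (players_map_per_position : List (String × List (String × List (String × Int)))) (price : Int) : Prop :=
  ∀ kv ∈ players_map_per_position, ∀ pl ∈ kv.2,
    ((PySem.Dict.mk pl.2).get? "price").isSome = true ∧
    PySem.Raise.InRange 16 (pvPlayerGet pl.2 "price") ∧
    ((PySem.Dict.mk pl.2).get? "performance").isSome = true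
instance (players_map_per_position : List (String × List (String × List (String × Int)))) (price : Int) : Decidable (Pre_create_price_buckets_per_position_sort_by_performance players_map_per_position price) := by unfold Pre_create_price_buckets_per_position_sort_by_performance; infer_instance

def pvWitness_create_price_buckets_per_position_sort_by_performance : (List (String × List (String × List (String × Int)))) × Int :=
  ([("GK", [("p1", [("price", 3), ("performance", 5)]), ("p2", [("price", 3), ("performance", 9)])])], 0)

def Spec_create_price_buckets_per_position_sort_by_performance (players_map_per_position : List (String × List (String × List (String × Int)))) (price : Int) (out : List (String × List (List (List (String × Int))))) : Prop := out = create_price_buckets_per_position_sort_by_performance_alt players_map_per_position price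
instance (players_map_per_position : List (String × List (String × List (String × Int)))) (price : Int) (out : List (String × List (List (List (String × Int))))) : Decidable (Spec_create_price_buckets_per_position_sort_by_performance players_map_per_position price out) := by unfold Spec_create_price_buckets_per_position_sort_by_performance; infer_instance

-- ===== CLAIM (what is proved, stated in full; the proofs are below) =====
def Claim_equal_create_price_buckets_per_position_sort_by_performance : Prop := ∀ (players_map_per_position : List (String × List (String × List (String × Int)))) (price : Int), Dom_create_price_buckets_per_position_sort_by_performance players_map_per_position price → Pre_create_price_buckets_per_position_sort_by_performance players_map_per_position price → Spec_create_price_buckets_per_position_sort_by_performance players_map_per_position price (create_price_buckets_per_position_sort_by_performance players_map_per_position price)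

-- ===== LEMMAS AND PROOFS =====

-- abbreviations for the pieces of the two ports
def pvPrice (pl : List (String × Int)) : Int := pvPlayerGet pl "price"
def pvPerf (pl : List (String × Int)) : Int := pvPlayerGet pl "performance"
def pvN (p : Int) : Nat := (if p < 0 then p + 16 else p).toNat
def pvInit : List (List (List (String × Int))) := List.replicate 16 []
def pvScatter (ps : List (List (String × Int))) (b : List (List (List (String × Int)))) : List (List (List (String × Int))) :=
  ps.foldl (fun b player =>
    PySem.List.pySetD b (pvPrice player) (PySem.List.pyGetD b (pvPrice player) [] ++ [player])) b
def pvSortEach (L : List Int) (b : List (List (List (String × Int)))) : List (List (List (String × Int))) :=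
  L.foldl (fun b i => PySem.List.pySetD b i (PySem.List.sorted (PySem.List.pyGetD b i []) pvPerf true)) b

theorem pvN_lt {p : Int} (h : PySem.Raise.InRange 16 p) : pvN p < 16 := by
  rcases h with ⟨h1, h2⟩; unfold pvN; split <;> omega

theorem pvIdx_eq {p : Int} (hp : PySem.Raise.InRange 16 p) :
    PySem.List.pyIdx? 16 p = some (pvN p) := by
  rcases hp with ⟨h1, h2⟩
  unfold PySem.List.pyIdx? pvN
  by_cases hneg : p < 0
  · rw [if_neg (by omega), if_pos (by simpa using h1), if_pos hneg]
    congr 1; omega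
  · rw [if_pos (by omega), if_pos (by simpa using h2), if_neg hneg]

theorem pv_pySetD_eq {α : Type} (b : List α) (p : Int) (v : α) (hb : b.length = 16)
    (hp : PySem.Raise.InRange 16 p) : PySem.List.pySetD b p v = b.set (pvN p) v := by
  simp [PySem.List.pySetD, PySem.List.pySet?, hb, pvIdx_eq hp]

theorem pv_pyGetD_eq {α : Type} (b : List α) (p : Int) (d : α) (hb : b.length = 16)
    (hp : PySem.Raise.InRange 16 p) : PySem.List.pyGetD b p d = b.getD (pvN p) d := by
  simp [PySem.List.pyGetD, PySem.List.pyGet?, hb, pvIdx_eq hp, List.getD_eq_getElem?_getD]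

theorem pv_getD_set {α : Type} (xs : List α) (n j : Nat) (v d : α) (hn : n < xs.length) :
    (xs.set n v).getD j d = if j = n then v else xs.getD j d := by
  by_cases hjn : j = n
  · subst hjn; simp [List.getD_eq_getElem?_getD, List.getElem?_set_self hn]
  · simp [List.getD_eq_getElem?_getD, List.getElem?_set_ne (Ne.symm hjn), hjn]

theorem pvScatter_length (ps : List (List (String × Int))) (b : List (List (List (String × Int)))) :
    (pvScatter ps b).length = b.length := by
  induction ps generalizing b with
  | nil => rfl
  | cons pl ps ih =>
    rw [show pvScatter (pl :: ps) b = pvScatter ps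
          (PySem.List.pySetD b (pvPrice pl) (PySem.List.pyGetD b (pvPrice pl) [] ++ [pl])) from rfl,
        ih, PySem.List.length_pySetD]

theorem pvScatter_getD (ps : List (List (String × Int))) (b : List (List (List (String × Int))))
    (hps : ∀ pl ∈ ps, PySem.Raise.InRange 16 (pvPrice pl)) (hb : b.length = 16) (j : Nat) :
    (pvScatter ps b).getD j [] = b.getD j [] ++ ps.filter (fun pl => decide (pvN (pvPrice pl) = j)) := by
  induction ps generalizing b with
  | nil => simp [pvScatter]
  | cons pl ps ih =>
    have hpl := hps pl (by simp)
    have hn : pvN (pvPrice pl) < 16 := pvN_lt hpl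
    have hstep : pvScatter (pl :: ps) b =
        pvScatter ps (b.set (pvN (pvPrice pl)) (b.getD (pvN (pvPrice pl)) [] ++ [pl])) := by
      simp only [pvScatter, List.foldl_cons, pv_pySetD_eq _ _ _ hb hpl, pv_pyGetD_eq _ _ _ hb hpl]
    rw [hstep, ih _ (fun q hq => hps q (by simp [hq])) (by simp [hb]),
        pv_getD_set _ _ _ _ _ (by omega)]
    by_cases hj : pvN (pvPrice pl) = j
    · simp [hj]
    · simp [hj, Ne.symm hj]

theorem pvSortEach_length (L : List Int) (b : List (List (List (String × Int)))) :
    (pvSortEach L b).length = b.length := by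
  induction L generalizing b with
  | nil => rfl
  | cons i L ih =>
    rw [show pvSortEach (i :: L) b = pvSortEach L
          (PySem.List.pySetD b i (PySem.List.sorted (PySem.List.pyGetD b i []) pvPerf true)) from rfl,
        ih, PySem.List.length_pySetD]

theorem pvSortEach_getD (L : List Int) (hnd : L.Nodup) (hL : ∀ i ∈ L, 0 ≤ i ∧ i < 16)
    (b : List (List (List (String × Int)))) (hb : b.length = 16) (j : Nat) (hj : j < 16) :
    (pvSortEach L b).getD j [] =
      if (j : Int) ∈ L then PySem.List.sorted (b.getD j []) pvPerf true else b.getD j [] := by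
  induction L generalizing b with
  | nil => simp [pvSortEach]
  | cons i L ih =>
    obtain ⟨hi0, hi16⟩ := hL i (by simp)
    have hiR : PySem.Raise.InRange 16 i := ⟨by omega, by omega⟩
    have hNi : pvN i = i.toNat := by unfold pvN; split <;> omega
    have hstep : pvSortEach (i :: L) b =
        pvSortEach L (b.set i.toNat (PySem.List.sorted (b.getD i.toNat []) pvPerf true)) := by
      simp only [pvSortEach, List.foldl_cons, pv_pySetD_eq _ _ _ hb hiR, pv_pyGetD_eq _ _ _ hb hiR, hNi]
    rw [hstep, ih hnd.of_cons (fun q hq => hL q (by simp [hq])) _ (by simp [hb]),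
        pv_getD_set _ _ _ _ _ (by omega)]
    by_cases hji : (j : Int) = i
    · have hjn : j = i.toNat := by omega
      have hjL : (j : Int) ∉ L := by rw [hji]; exact (List.nodup_cons.mp hnd).1
      rw [if_neg hjL, if_pos hjn, if_pos (show (j:Int) ∈ i :: L by rw [hji]; simp), hjn]
    · have hjn : ¬ j = i.toNat := by omega
      by_cases hjL : (j : Int) ∈ L
      · rw [if_pos hjL, if_neg hjn, if_pos (show (j:Int) ∈ i :: L from List.mem_cons_of_mem _ hjL)]
      · rw [if_neg hjL, if_neg hjn, if_neg (show ¬ (j:Int) ∈ i :: L by simp [hji, hjL])]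

-- stability: insertion (descending by key) commutes with filter when the target list is sorted
theorem pv_insertBy_all_before {α : Type} (before : α → α → Bool) (x : α) (l : List α)
    (h : ∀ z ∈ l, before x z = true) : PySem.List.insertBy before x l = x :: l := by
  cases l with
  | nil => rfl
  | cons y ys => simp [PySem.List.insertBy, h y (by simp)]

theorem pv_insertBy_pairwise {α : Type} (key : α → Int) (x : α) (l : List α)
    (h : l.Pairwise (fun a b => key b ≤ key a)) :
    (PySem.List.insertBy (fun a b => decide (key b < key a)) x l).Pairwise (fun a b => key b ≤ key a) := by
  induction l with
  | nil => simp [PySem.List.insertBy]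
  | cons y ys ih =>
    rcases List.pairwise_cons.mp h with ⟨hy, hys⟩
    by_cases hxy : key y < key x
    · have hins : PySem.List.insertBy (fun a b => decide (key b < key a)) x (y :: ys) = x :: y :: ys := by
        simp [PySem.List.insertBy, hxy]
      rw [hins]
      refine List.pairwise_cons.mpr ⟨?_, h⟩
      intro z hz
      rcases List.mem_cons.mp hz with rfl | hz
      · omega
      · have := hy z hz; omega
    · have hins : PySem.List.insertBy (fun a b => decide (key b < key a)) x (y :: ys) =
          y :: PySem.List.insertBy (fun a b => decide (key b < key a)) x ys := by
        simp [PySem.List.insertBy, hxy]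
      rw [hins]
      refine List.pairwise_cons.mpr ⟨?_, ih hys⟩
      intro z hz
      rcases (PySem.List.mem_insertBy _ _ _ _).mp hz with rfl | hz
      · omega
      · exact hy z hz

theorem pv_filter_insertBy {α : Type} (q : α → Bool) (key : α → Int) (x : α) (l : List α)
    (h : l.Pairwise (fun a b => key b ≤ key a)) :
    (PySem.List.insertBy (fun a b => decide (key b < key a)) x l).filter q =
      if q x then PySem.List.insertBy (fun a b => decide (key b < key a)) x (l.filter q)
      else l.filter q := by
  induction l with
  | nil => cases hqx : q x <;> simp [PySem.List.insertBy, hqx]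
  | cons y ys ih =>
    rcases List.pairwise_cons.mp h with ⟨hy, hys⟩
    by_cases hxy : key y < key x
    · have hins : PySem.List.insertBy (fun a b => decide (key b < key a)) x (y :: ys) = x :: y :: ys := by
        simp [PySem.List.insertBy, hxy]
      rw [hins]
      cases hqx : q x with
      | false => simp [List.filter_cons, hqx]
      | true =>
        cases hqy : q y with
        | true => simp [hqx, hqy, PySem.List.insertBy, hxy]
        | false =>
          have hrw := pv_insertBy_all_before (fun a b => decide (key b < key a)) x (ys.filter q)
            (by intro z hz; have := hy z (List.mem_of_mem_filter hz); simp; omega)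
          simp [hqx, hqy, hrw]
    · have hins : PySem.List.insertBy (fun a b => decide (key b < key a)) x (y :: ys) =
          y :: PySem.List.insertBy (fun a b => decide (key b < key a)) x ys := by
        simp [PySem.List.insertBy, hxy]
      have hins2 : ∀ m : List α, PySem.List.insertBy (fun a b => decide (key b < key a)) x (y :: m) =
          y :: PySem.List.insertBy (fun a b => decide (key b < key a)) x m := fun m => by
        simp [PySem.List.insertBy, hxy]
      rw [hins]
      cases hqx : q x <;> cases hqy : q y <;>
        simp [ih hys, hqx, hqy, hins2]

theorem pv_filter_foldl_insertBy (q : List (String × Int) → Bool) (key : List (String × Int) → Int)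
    (xs acc : List (List (String × Int))) (h : acc.Pairwise (fun a b => key b ≤ key a)) :
    (xs.foldl (fun acc x => PySem.List.insertBy (fun a b => decide (key b < key a)) x acc) acc).filter q =
      (xs.filter q).foldl (fun acc x => PySem.List.insertBy (fun a b => decide (key b < key a)) x acc) (acc.filter q) := by
  induction xs generalizing acc with
  | nil => simp
  | cons a xs ih =>
    rw [List.foldl_cons, ih _ (pv_insertBy_pairwise key a acc h), pv_filter_insertBy q key a acc h,
        List.filter_cons]
    cases hqa : q a <;> simp

theorem pv_sorted_filter (q : List (String × Int) → Bool) (ps : List (List (String × Int))) :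
    PySem.List.sorted (ps.filter q) pvPerf true = (PySem.List.sorted ps pvPerf true).filter q := by
  rw [PySem.List.sorted_rev_eq_foldl_insertBy, PySem.List.sorted_rev_eq_foldl_insertBy,
      pv_filter_foldl_insertBy q pvPerf ps [] (by simp)]
  rfl

theorem pvInit_getD (j : Nat) : pvInit.getD j [] = [] := by
  unfold pvInit
  rw [List.getD_eq_getElem?_getD, List.getElem?_replicate]
  split <;> rfl

-- A's first loop and B's comprehension both build the 16 empty buckets
theorem pvA_init : (PySem.List.pyRange 0 (15 + 1)).foldl
    (fun b _ => b ++ [([] : List (List (String × Int)))]) [] = pvInit := by decide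

theorem pvB_init : (List.range (15 + 1)).map (fun _ => ([] : List (List (String × Int)))) = pvInit := by decide

-- the per-position value computed by A equals the one computed by B
theorem pv_key_val_eq (ps : List (List (String × Int)))
    (hps : ∀ pl ∈ ps, PySem.Raise.InRange 16 (pvPrice pl)) :
    pvSortEach (PySem.List.pyRange 0 (15 + 1)) (pvScatter ps pvInit) =
      pvScatter (PySem.List.sorted ps pvPerf true) pvInit := by
  have hsl : (pvScatter ps pvInit).length = 16 := by rw [pvScatter_length]; rfl
  have hps' : ∀ pl ∈ PySem.List.sorted ps pvPerf true, PySem.Raise.InRange 16 (pvPrice pl) := by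
    intro pl hpl; exact hps pl ((PySem.List.mem_sorted _ _ _ _).mp hpl)
  have hlen : (pvSortEach (PySem.List.pyRange 0 (15 + 1)) (pvScatter ps pvInit)).length =
      (pvScatter (PySem.List.sorted ps pvPerf true) pvInit).length := by
    rw [pvSortEach_length, pvScatter_length, pvScatter_length]
  apply List.ext_getElem hlen
  intro j hj1 hj2
  have hj : j < 16 := by
    have := hlen; rw [pvSortEach_length, hsl] at hj1; omega
  have hgetD : ∀ (xs : List (List (List (String × Int)))) (hx : j < xs.length), xs[j] = xs.getD j [] := by
    intro xs hx; rw [List.getD_eq_getElem?_getD, List.getElem?_eq_getElem hx]; rfl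
  rw [hgetD _ hj1, hgetD _ hj2,
      pvSortEach_getD _ (PySem.List.nodup_pyRange_one _ _)
        (fun i hi => by rcases PySem.List.mem_pyRange_one.mp hi with ⟨h1, h2⟩; exact ⟨h1, by omega⟩)
        _ hsl j hj,
      if_pos (PySem.List.mem_pyRange_one.mpr ⟨by omega, by omega⟩),
      pvScatter_getD ps pvInit hps rfl j,
      pvScatter_getD _ pvInit hps' rfl j,
      pvInit_getD, List.nil_append, List.nil_append,
      pv_sorted_filter (fun pl => decide (pvN (pvPrice pl) = j)) ps]

set_option maxRecDepth 8000 in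
theorem pv_portA (m : List (String × List (String × List (String × Int)))) (price : Int) :
    create_price_buckets_per_position_sort_by_performance m price =
      (m.foldl (fun d kv => d.insert kv.1
        (pvSortEach (PySem.List.pyRange 0 (15 + 1))
          (pvScatter ((PySem.Dict.mk ((PySem.Dict.mk m).getD kv.1 [])).values) pvInit)))
        PySem.Dict.empty).items := by
  unfold create_price_buckets_per_position_sort_by_performance
  simp only [pvA_init]
  rfl

set_option maxRecDepth 8000 in
theorem pv_portB (m : List (String × List (String × List (String × Int)))) (price : Int) :
    create_price_buckets_per_position_sort_by_performance_alt m price =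
      (m.foldl (fun d kv => d.insert kv.1
        (pvScatter
          (PySem.List.sorted ((PySem.Dict.mk ((PySem.Dict.mk m).getD kv.1 [])).values) pvPerf true)
          pvInit))
        PySem.Dict.empty).items := by
  unfold create_price_buckets_per_position_sort_by_performance_alt
  simp only [pvB_init]
  rfl

-- ===== VERDICT (by name: the statement is the Claim_ definition above) =====
theorem create_price_buckets_per_position_sort_by_performance_spec : Claim_equal_create_price_buckets_per_position_sort_by_performance := by
  intro m price _hdom hpre
  unfold Spec_create_price_buckets_per_position_sort_by_performance
  rw [pv_portA, pv_portB]
  refine congrArg PySem.Dict.items ?_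
  have hfold : ∀ (l : List (String × List (String × List (String × Int)))), l ⊆ m →
      ∀ d : PySem.Dict String (List (List (List (String × Int)))),
      l.foldl (fun d kv =>
        d.insert kv.1
          (pvSortEach (PySem.List.pyRange 0 (15 + 1))
            (pvScatter ((PySem.Dict.mk ((PySem.Dict.mk m).getD kv.1 [])).values) pvInit))) d =
      l.foldl (fun d kv =>
        d.insert kv.1
          (pvScatter
            (PySem.List.sorted ((PySem.Dict.mk ((PySem.Dict.mk m).getD kv.1 [])).values) pvPerf true)
            pvInit)) d := by
    intro l hl
    induction l with
    | nil => intro d; rw [List.foldl_nil, List.foldl_nil]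
    | cons kv l ih =>
      intro d
      rw [List.foldl_cons, List.foldl_cons, ih (fun x hx => hl (by simp [hx])),
          pv_key_val_eq _ ?_]
      intro pl hpl
      -- pl is a value of the dict m[kv.1]; Pre_ gives its price is a valid bucket index
      rcases hv : (PySem.Dict.mk m).get? kv.1 with _ | v
      · simp only [PySem.Dict.getD, hv, Option.getD_none] at hpl
        simp [PySem.Dict.values] at hpl
      · simp only [PySem.Dict.getD, hv, Option.getD_some] at hpl
        simp only [PySem.Dict.get?] at hv
        rcases Option.map_eq_some_iff.mp hv with ⟨p, hfind, hp2⟩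
        have hpm : p ∈ m := List.mem_of_find?_eq_some hfind
        simp only [PySem.Dict.values, List.mem_map] at hpl
        rcases hpl with ⟨q, hq, rfl⟩
        exact (hpre p hpm q (by first | exact hq | (rw [hp2]; exact hq))).2.1
  exact hfold m (fun x hx => hx) PySem.Dict.empty
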